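-- pv_equiv track=rewrite | github.com/guidao20/Dao_Sytstem | plan_split_pane.py | insert_dict_make
-- ===== SOURCE A (Python) =====
-- def insert_dict_make(list_, condition):
--     list_record = []
--     list_name = []
--     for idx, elem in enumerate(list_):
--         if elem.strip().split('  ')[0].split(':')[0] == condition:
--             list_name.append(elem.strip())
--             list_record.append(idx)
--     list_record1 = list_record[1:]
--     list_record1.append(len(list_))
--     nvs = zip(list_name, list_record1)
--     insert_dict = dict((name, value) for name, value in nvs)
--     return insert_dict,list_name
-- ===== SOURCE B (Python) =====
-- def insert_dict_make(list_, condition):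
--     # Single pass: remember the previous match's stripped name and map it to the
--     # current match's index; the last match maps to len(list_).
--     insert_dict = {}
--     list_name = []
--     prev = None
--     for idx, elem in enumerate(list_):
--         stripped = elem.strip()
--         if stripped.split('  ')[0].split(':')[0] == condition:
--             list_name.append(stripped)
--             if prev is not None:
--                 insert_dict[prev] = idx
--             prev = stripped
--     if prev is not None:
--         insert_dict[prev] = len(list_)
--     return insert_dict, list_name
-- ===== Notes on version B (the rewrite author's own statement) =====
-- stated objective: simpler
-- what changed: B builds insert_dict in a single pass by remembering the previous match's stripped name (last match maps to len(list_)), instead of A's collect-indices, shift-by-one slice, zip and dict-comprehension pipeline.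
import Mathlib
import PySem

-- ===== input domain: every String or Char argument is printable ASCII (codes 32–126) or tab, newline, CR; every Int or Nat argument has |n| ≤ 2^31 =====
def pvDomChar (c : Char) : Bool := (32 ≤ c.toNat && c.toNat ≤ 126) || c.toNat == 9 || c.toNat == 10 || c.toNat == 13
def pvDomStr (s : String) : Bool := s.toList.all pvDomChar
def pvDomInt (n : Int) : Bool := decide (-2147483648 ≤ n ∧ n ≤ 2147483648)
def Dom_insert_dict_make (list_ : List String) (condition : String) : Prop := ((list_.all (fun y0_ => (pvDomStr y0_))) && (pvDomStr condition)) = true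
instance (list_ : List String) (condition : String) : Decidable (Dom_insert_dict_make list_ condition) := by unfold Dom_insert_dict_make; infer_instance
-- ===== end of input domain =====

-- B builds the dict in one pass (previous-match variable) instead of A's record/shift/zip pipeline; objective: simpler.

-- shared key helper: s.split('  ')[0].split(':')[0] for a string s.
-- split? with a non-empty separator always returns 'some' of a non-empty list, so getD/headD are exact for Python's [0].
def pvKey (s : String) : String :=
  ((PySem.Str.split? (((PySem.Str.split? s "  ").getD []).headD "") ":").getD []).headD ""

-- ===== PORT A =====
-- the 'for idx, elem in enumerate(list_)' loop, appending to list_record / list_name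
def aGo (condition : String) (idx : Int) (record : List Int) (names : List String) :
    List String → List Int × List String
  | [] => (record, names)
  | e :: rest =>
    if pvKey (PySem.Str.strip e) == condition then
      aGo condition (idx + 1) (record ++ [idx]) (names ++ [PySem.Str.strip e]) rest
    else
      aGo condition (idx + 1) record names rest

def insert_dict_make (list_ : List String) (condition : String) : (List (String × Int)) × List String :=
  let st := aGo condition 0 [] [] list_
  let list_record := st.1
  let list_name := st.2
  let list_record1 := PySem.List.slice list_record (some 1) none ++ [(list_.length : Int)]
  let nvs := list_name.zip list_record1
  let insert_dict := nvs.foldl (fun (d : PySem.Dict String Int) nv => d.insert nv.1 nv.2) PySem.Dict.empty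
  (insert_dict.items, list_name)

-- ===== PORT B =====
-- the single-pass loop: dict, names and the previous match's stripped name
def bGo (condition : String) (idx : Int) (d : PySem.Dict String Int) (names : List String)
    (prev : Option String) : List String → PySem.Dict String Int × List String × Option String
  | [] => (d, names, prev)
  | e :: rest =>
    let stripped := PySem.Str.strip e
    if pvKey stripped == condition then
      bGo condition (idx + 1)
        (match prev with | none => d | some p => d.insert p idx)
        (names ++ [stripped]) (some stripped) rest
    else
      bGo condition (idx + 1) d names prev rest

-- trailing 'if prev is not None: insert_dict[prev] = len(list_)'
def bFinish (d : PySem.Dict String Int) (prev : Option String) (n : Int) : PySem.Dict String Int :=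
  match prev with
  | none => d
  | some p => d.insert p n

def insert_dict_make_alt (list_ : List String) (condition : String) : (List (String × Int)) × List String :=
  let st := bGo condition 0 PySem.Dict.empty [] none list_
  ((bFinish st.1 st.2.2 (list_.length : Int)).items, st.2.1)

-- ===== PRECONDITION & SPEC =====
def Spec_insert_dict_make (list_ : List String) (condition : String) (out : (List (String × Int)) × List String) : Prop := out = insert_dict_make_alt list_ condition
instance (list_ : List String) (condition : String) (out : (List (String × Int)) × List String) : Decidable (Spec_insert_dict_make list_ condition out) := by unfold Spec_insert_dict_make; infer_instance

-- ===== CLAIM (what is proved, stated in full; the proofs are below) =====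
def Claim_equal_insert_dict_make : Prop := ∀ (list_ : List String) (condition : String), Dom_insert_dict_make list_ condition → Spec_insert_dict_make list_ condition (insert_dict_make list_ condition)

-- ===== LEMMAS AND PROOFS =====

-- the matches of the list starting at index i: (index, stripped name) in order
def pvMatches (c : String) (i : Int) : List String → List (Int × String)
  | [] => []
  | e :: rest =>
    if pvKey (PySem.Str.strip e) == c then
      (i, PySem.Str.strip e) :: pvMatches c (i + 1) rest
    else
      pvMatches c (i + 1) rest

-- the dict both programs end up with, described once over the match list
def dictOf (d : PySem.Dict String Int) (prev : Option String) (n : Int) :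
    List (Int × String) → PySem.Dict String Int
  | [] => bFinish d prev n
  | (i, s) :: rest => dictOf (match prev with | none => d | some p => d.insert p i) (some s) n rest

theorem aGo_spec (c : String) : ∀ (l : List String) (i : Int) (r : List Int) (ns : List String),
    aGo c i r ns l = (r ++ (pvMatches c i l).map Prod.fst, ns ++ (pvMatches c i l).map Prod.snd) := by
  intro l
  induction l with
  | nil => intro i r ns; simp [aGo, pvMatches]
  | cons e rest ih =>
    intro i r ns
    by_cases h : pvKey (PySem.Str.strip e) == c
    · simp [aGo, pvMatches, h, ih]
    · simp [aGo, pvMatches, h, ih]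

theorem bGo_spec (c : String) : ∀ (l : List String) (i : Int) (d : PySem.Dict String Int)
    (ns : List String) (prev : Option String) (n : Int),
    (bGo c i d ns prev l).2.1 = ns ++ (pvMatches c i l).map Prod.snd ∧
    bFinish (bGo c i d ns prev l).1 (bGo c i d ns prev l).2.2 n = dictOf d prev n (pvMatches c i l) := by
  intro l
  induction l with
  | nil => intro i d ns prev n; simp [bGo, pvMatches, dictOf]
  | cons e rest ih =>
    intro i d ns prev n
    by_cases h : pvKey (PySem.Str.strip e) == c
    · have hx := ih (i + 1) (match prev with | none => d | some p => d.insert p i)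
        (ns ++ [PySem.Str.strip e]) (some (PySem.Str.strip e)) n
      simpa [bGo, pvMatches, dictOf, h] using hx
    · simpa [bGo, pvMatches, dictOf, h] using ih (i + 1) d ns prev n

-- A's zip-fold over a match list that starts with previous name p
theorem foldA_some (n : Int) : ∀ (ms : List (Int × String)) (d : PySem.Dict String Int) (p : String),
    ((p :: ms.map Prod.snd).zip (ms.map Prod.fst ++ [n])).foldl
        (fun (d : PySem.Dict String Int) nv => d.insert nv.1 nv.2) d
      = dictOf d (some p) n ms := by
  intro ms
  induction ms with
  | nil => intro d p; simp [dictOf, bFinish]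
  | cons m rest ih =>
    intro d p
    obtain ⟨i, s⟩ := m
    simp only [List.map_cons, List.cons_append, List.zip_cons_cons, List.foldl_cons, dictOf]
    exact ih (d.insert p i) s

theorem foldA_none (n : Int) (ms : List (Int × String)) (d : PySem.Dict String Int) :
    ((ms.map Prod.snd).zip ((ms.map Prod.fst).tail ++ [n])).foldl
        (fun (d : PySem.Dict String Int) nv => d.insert nv.1 nv.2) d
      = dictOf d none n ms := by
  cases ms with
  | nil => simp [dictOf, bFinish]
  | cons m rest =>
    obtain ⟨i, s⟩ := m
    simpa [dictOf] using foldA_some n rest d s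

-- ===== VERDICT (by name: the statement is the Claim_ definition above) =====
theorem insert_dict_make_spec : Claim_equal_insert_dict_make := by
  intro list_ condition _
  unfold Spec_insert_dict_make insert_dict_make insert_dict_make_alt
  have ha := aGo_spec condition list_ 0 [] []
  have hb := bGo_spec condition list_ 0 PySem.Dict.empty [] none (list_.length : Int)
  simp only [ha, List.nil_append, PySem.List.slice_from_one]
  rw [hb.1, foldA_none (list_.length : Int) (pvMatches condition 0 list_) PySem.Dict.empty, ← hb.2]
  simp
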